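-- pv_equiv track=rewrite | github.com/ArantzaSan/Practicas.IA3erParcial | 2daPractica/Ordenamiento_Interno/2_NaturalMerging.py | encontrar_runs
-- ===== SOURCE A (Python) =====
-- def encontrar_runs(arr):
--     """
--     Encuentra las secuencias ordenadas (runs) en la lista.
--     Devuelve una lista de tuplas (inicio, fin) para cada run.
--     """
--     runs = []
--     n = len(arr)
--     i = 0
--     while i < n:
--         start = i
--         # Avanza mientras la secuencia esté ordenada
--         while i + 1 < n and arr[i] <= arr[i + 1]:
--             i += 1
--         runs.append((start, i))
--         i += 1
--     return runs
-- ===== SOURCE B (Python) =====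
-- def encontrar_runs(arr):
--     """
--     Encuentra las secuencias ordenadas (runs) en la lista.
--     Devuelve una lista de tuplas (inicio, fin) para cada run.
--     """
--     n = len(arr)
--     if n == 0:
--         return []
--     breaks = [i for i in range(n - 1) if arr[i] > arr[i + 1]]
--     runs = []
--     start = 0
--     for b in breaks:
--         runs.append((start, b))
--         start = b + 1
--     runs.append((start, n - 1))
--     return runs
-- ===== Notes on version B (the rewrite author's own statement) =====
-- stated objective: alternative
-- what changed: Replaces A's nested while loops with a two-phase decomposition: one comprehension collects all descent positions (breaks), then a single walk over that break list reconstructs the (start, end) runs.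
import Mathlib
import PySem

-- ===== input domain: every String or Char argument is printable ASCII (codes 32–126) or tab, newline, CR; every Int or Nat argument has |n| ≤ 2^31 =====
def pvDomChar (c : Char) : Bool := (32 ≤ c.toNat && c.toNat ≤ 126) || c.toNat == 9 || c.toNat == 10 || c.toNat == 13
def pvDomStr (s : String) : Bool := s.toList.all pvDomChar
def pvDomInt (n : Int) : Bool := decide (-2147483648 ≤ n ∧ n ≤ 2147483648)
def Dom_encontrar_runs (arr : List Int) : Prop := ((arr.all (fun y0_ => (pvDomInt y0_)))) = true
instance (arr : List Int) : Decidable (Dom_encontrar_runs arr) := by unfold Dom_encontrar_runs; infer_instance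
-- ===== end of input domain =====

-- B finds the run boundaries with one break-position pass and then rebuilds the
-- (start, end) runs from that break list, instead of A's nested while loops
-- (objective: alternative decomposition, same O(n) cost).

-- ===== PORT A =====
-- inner while: advance i while i + 1 < n and arr[i] <= arr[i+1]
def pvRunAInner (arr : List Int) (i : Nat) : Nat :=
  if _h : i + 1 < arr.length ∧ arr.getD i 0 ≤ arr.getD (i + 1) 0 then
    pvRunAInner arr (i + 1)
  else i
termination_by arr.length - i

theorem pvRunAInner_ge (arr : List Int) (i : Nat) : i ≤ pvRunAInner arr i := by
  fun_induction pvRunAInner with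
  | case1 i h ih => omega
  | case2 i h => omega

-- outer while over i
def pvRunALoop (arr : List Int) (i : Nat) : List (Int × Int) :=
  if h : i < arr.length then
    let j := pvRunAInner arr i
    ((i : Int), (j : Int)) :: pvRunALoop arr (j + 1)
  else []
termination_by arr.length - i
decreasing_by
  have := pvRunAInner_ge arr i
  omega

def encontrar_runs (arr : List Int) : List (Int × Int) := pvRunALoop arr 0

-- ===== PORT B =====
def encontrar_runs_alt (arr : List Int) : List (Int × Int) :=
  let n := arr.length
  if n = 0 then []
  else
    let breaks := (List.range (n - 1)).filter
      (fun i => arr.getD (i + 1) 0 < arr.getD i 0)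
    let st := breaks.foldl
      (fun (p : List (Int × Int) × Nat) (b : Nat) => (p.1 ++ [((p.2 : Int), (b : Int))], b + 1))
      ([], 0)
    st.1 ++ [((st.2 : Int), (n : Int) - 1)]

-- ===== PRECONDITION & SPEC =====
def Spec_encontrar_runs (arr : List Int) (out : List (Int × Int)) : Prop := out = encontrar_runs_alt arr
instance (arr : List Int) (out : List (Int × Int)) : Decidable (Spec_encontrar_runs arr out) := by unfold Spec_encontrar_runs; infer_instance

-- ===== CLAIM (what is proved, stated in full; the proofs are below) =====
def Claim_equal_encontrar_runs : Prop := ∀ (arr : List Int), Dom_encontrar_runs arr → Spec_encontrar_runs arr (encontrar_runs arr)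

-- ===== LEMMAS AND PROOFS =====

-- the break positions from index i upward, as a recursion
def pvBF (arr : List Int) (i : Nat) : List Nat :=
  if _h : i < arr.length - 1 then
    if arr.getD (i + 1) 0 < arr.getD i 0 then i :: pvBF arr (i + 1) else pvBF arr (i + 1)
  else []
termination_by arr.length - 1 - i

-- reconstructing runs from a break list
def pvWalk (start : Nat) (bs : List Nat) (last : Nat) : List (Int × Int) :=
  match bs with
  | [] => [((start : Int), (last : Int))]
  | b :: bs' => ((start : Int), (b : Int)) :: pvWalk (b + 1) bs' last

theorem pvBF_eq_filter (arr : List Int) (i : Nat) :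
    pvBF arr i = (List.range' i (arr.length - 1 - i)).filter
      (fun k => arr.getD (k + 1) 0 < arr.getD k 0) := by
  fun_induction pvBF with
  | case1 i h hb ih =>
    have hr : arr.length - 1 - i = (arr.length - 1 - (i + 1)) + 1 := by omega
    rw [hr, List.range'_succ, List.filter_cons]
    simp [List.getD] at hb
    simp [hb, ih]
  | case2 i h hb ih =>
    have hr : arr.length - 1 - i = (arr.length - 1 - (i + 1)) + 1 := by omega
    rw [hr, List.range'_succ, List.filter_cons]
    simp [List.getD] at hb
    simp [hb, ih]
  | case3 i h =>
    have : arr.length - 1 - i = 0 := by omega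
    simp [this]

theorem pvFoldl_walk (last : Nat) (bs : List Nat) (acc : List (Int × Int)) (start : Nat) :
    (bs.foldl
      (fun (p : List (Int × Int) × Nat) (b : Nat) => (p.1 ++ [((p.2 : Int), (b : Int))], b + 1))
      (acc, start)).1 ++
      [(((bs.foldl
      (fun (p : List (Int × Int) × Nat) (b : Nat) => (p.1 ++ [((p.2 : Int), (b : Int))], b + 1))
      (acc, start)).2 : Int), (last : Int))] = acc ++ pvWalk start bs last := by
  induction bs generalizing acc start with
  | nil => simp [pvWalk]
  | cons b bs ih =>
    simp only [List.foldl_cons, pvWalk]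
    rw [ih]
    simp

-- main invariant: one A-iteration starting at i with pending start produces the walk of pvBF
theorem pvLoop_walk (arr : List Int) (k : Nat) : ∀ (i start : Nat),
    arr.length - i ≤ k → i < arr.length →
    ((start : Int), (pvRunAInner arr i : Int)) :: pvRunALoop arr (pvRunAInner arr i + 1)
      = pvWalk start (pvBF arr i) (arr.length - 1) := by
  induction k with
  | zero => intro i start hk hi; omega
  | succ k ih =>
    intro i start hk hi
    by_cases hc : i + 1 < arr.length ∧ arr.getD i 0 ≤ arr.getD (i + 1) 0
    · -- arr[i] <= arr[i+1]: not a break, inner advances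
      have hinner : pvRunAInner arr i = pvRunAInner arr (i + 1) := by
        rw [pvRunAInner, dif_pos hc]
      have hbf : pvBF arr i = pvBF arr (i + 1) := by
        simp only [List.getD] at hc
        rw [pvBF]
        have h1 : i < arr.length - 1 := by omega
        simp [h1, List.getD, not_lt.mpr hc.2]
      rw [hinner, hbf]
      exact ih (i + 1) start (by omega) (by omega)
    · have hstop : pvRunAInner arr i = i := by
        rw [pvRunAInner, dif_neg hc]
      by_cases hend : i + 1 < arr.length
      · -- i is a break position
        have hb : arr.getD (i + 1) 0 < arr.getD i 0 := by
          by_contra hle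
          exact hc ⟨hend, by omega⟩
        have hbf : pvBF arr i = i :: pvBF arr (i + 1) := by
          simp only [List.getD] at hb
          rw [pvBF]
          have h1 : i < arr.length - 1 := by omega
          simp [h1, List.getD, hb]
        rw [hstop, hbf, pvWalk]
        congr 1
        rw [pvRunALoop, dif_pos hend]
        exact ih (i + 1) (i + 1) (by omega) hend
      · -- i = n - 1: last run ends here
        have hlast : i = arr.length - 1 := by omega
        have hbf : pvBF arr i = [] := by
          rw [pvBF]
          simp [show ¬ i < arr.length - 1 by omega]
        rw [hstop, hbf, pvWalk, hlast]
        congr 1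
        rw [pvRunALoop]
        simp [show ¬ arr.length - 1 + 1 < arr.length by omega]

-- ===== VERDICT (by name: the statement is the Claim_ definition above) =====
theorem encontrar_runs_spec : Claim_equal_encontrar_runs := by
  intro arr _
  unfold Spec_encontrar_runs encontrar_runs encontrar_runs_alt
  by_cases hn : arr.length = 0
  · rw [pvRunALoop]
    simp [hn]
  · have h0 : 0 < arr.length := by omega
    simp only [hn, reduceIte]
    have hbf : pvBF arr 0 =
        (List.range (arr.length - 1)).filter
          (fun k => arr.getD (k + 1) 0 < arr.getD k 0) := by
      rw [pvBF_eq_filter, List.range_eq_range', Nat.sub_zero]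
    have hf := pvFoldl_walk (arr.length - 1)
      ((List.range (arr.length - 1)).filter (fun k => decide (arr.getD (k + 1) 0 < arr.getD k 0)))
      [] 0
    have hcast : (((arr.length - 1 : Nat)) : Int) = (arr.length : Int) - 1 := by omega
    rw [hcast] at hf
    rw [pvRunALoop, dif_pos h0,
      pvLoop_walk arr arr.length 0 0 (by omega) h0, hbf]
    simpa using hf.symm
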